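-- pv_equiv track=rewrite | github.com/Ashwinisaw/Python_Programs | PythonExerciseAll/List_Exercises.py | remele
-- ===== SOURCE A (Python) =====
-- def remele(li,word,n):
--     count = 0
--     for i in range(0,len(li)):
--         if li[i] == word:
--             count = count + 1
--             if count == n:
--                del(li[i])
--                return True
--     return False
-- ===== SOURCE B (Python) =====
-- def remele(li, word, n):
--     indices = [i for i, x in enumerate(li) if x == word]
--     if n >= 1 and len(indices) >= n:
--         del li[indices[n - 1]]
--         return True
--     return False
-- ===== Notes on version B (the rewrite author's own statement) =====
-- stated objective: simpler
-- what changed: Replaces A's single early-returning scan with a counter by a collect-all-matching-indices pass followed by one arithmetic test (and one deletion), trading in-loop state for an index table.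
import Mathlib
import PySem

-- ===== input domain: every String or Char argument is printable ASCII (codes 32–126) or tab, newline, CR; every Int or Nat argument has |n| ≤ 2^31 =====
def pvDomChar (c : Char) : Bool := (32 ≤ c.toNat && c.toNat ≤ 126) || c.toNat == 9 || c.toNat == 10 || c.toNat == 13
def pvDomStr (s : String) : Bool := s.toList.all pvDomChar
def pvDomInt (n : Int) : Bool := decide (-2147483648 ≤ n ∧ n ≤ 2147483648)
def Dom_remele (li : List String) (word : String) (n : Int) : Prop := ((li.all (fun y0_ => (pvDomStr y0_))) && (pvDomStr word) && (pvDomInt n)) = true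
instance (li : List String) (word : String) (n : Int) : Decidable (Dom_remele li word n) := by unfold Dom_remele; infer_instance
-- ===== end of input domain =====

-- B replaces A's early-returning counter scan by collecting the matching indices first and
-- then testing/deleting once (same in-place deletion of li; equivalence proved for the return value).


-- ===== PORT A =====
-- A scans the list left to right keeping a running count of matches; when the count hits n it
-- deletes that element and returns True (the deletion does not affect the return value).
def remeleGo (xs : List String) (word : String) (n : Int) (count : Int) : Bool :=
  match xs with
  | [] => false
  | x :: rest =>
      if x = word then
        (if count + 1 = n then true else remeleGo rest word n (count + 1))
      else remeleGo rest word n count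

def remele (li : List String) (word : String) (n : Int) : Bool :=
  remeleGo li word n 0

-- ===== PORT B =====
-- B builds the index table of all matches, then returns whether n >= 1 and there are at least n.
def remele_alt (li : List String) (word : String) (n : Int) : Bool :=
  let indices : List Int := ((PySem.List.enumerate li 0).filter (fun p => p.2 = word)).map Prod.fst
  if 1 ≤ n ∧ n ≤ (indices.length : Int) then true else false

-- ===== PRECONDITION & SPEC =====
def Spec_remele (li : List String) (word : String) (n : Int) (out : Bool) : Prop := out = remele_alt li word n
instance (li : List String) (word : String) (n : Int) (out : Bool) : Decidable (Spec_remele li word n out) := by unfold Spec_remele; infer_instance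

-- ===== CLAIM (what is proved, stated in full; the proofs are below) =====
def Claim_equal_remele : Prop := ∀ (li : List String) (word : String) (n : Int), Dom_remele li word n → Spec_remele li word n (remele li word n)

-- ===== LEMMAS AND PROOFS =====

-- the filtered index table has exactly as many entries as there are matches
theorem length_filter_enumerate (xs : List String) (word : String) (s : Int) :
    ((PySem.List.enumerate xs s).filter (fun p => p.2 = word)).length
      = (xs.filter (fun x => x = word)).length := by
  induction xs generalizing s with
  | nil => simp [PySem.List.enumerate_nil]
  | cons x rest ih =>
      simp only [PySem.List.enumerate_cons, List.filter_cons]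
      by_cases h : x = word <;> simp [h, ih]

-- the loop invariant: A's scan from accumulator c returns true iff c < n and there are at
-- least n - c matches remaining
theorem remeleGo_eq (xs : List String) (word : String) (n c : Int) :
    remeleGo xs word n c
      = decide (c < n ∧ n ≤ c + ((xs.filter (fun x => x = word)).length : Int)) := by
  induction xs generalizing c with
  | nil => simp [remeleGo]
  | cons x rest ih =>
      by_cases h : x = word
      · rw [remeleGo]
        simp only [List.filter_cons, h]
        simp only [decide_true, if_pos]
        by_cases hn : c + 1 = n
        · rw [if_pos hn, eq_comm, decide_eq_true_iff]
          simp only [List.length_cons]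
          push_cast
          omega
        · rw [if_neg hn, ih]
          simp only [decide_eq_decide, List.length_cons]
          push_cast
          omega
      · rw [remeleGo]
        simp only [if_neg h, List.filter_cons]
        rw [ih]
        simp [h]

-- ===== VERDICT (by name: the statement is the Claim_ definition above) =====
theorem remele_spec : Claim_equal_remele := by
  intro li word n _
  unfold Spec_remele remele remele_alt
  rw [remeleGo_eq]
  simp only [List.length_map, length_filter_enumerate]
  split_ifs with h
  · simp; omega
  · simp; omega
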